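-- pv_equiv track=rewrite | github.com/ha4219/algorithm | boj/boj_21314.py | fmin
-- ===== SOURCE A (Python) =====
-- def fmin(s):
--     sl = len(s)
--     res = ''
--     m = 0
--     k = 0
--     for i in range(sl):
--         if s[i]=='M':
--             m+=1
--         else:
--             if m>1:
--                 res += '1'+'0'*(m-1)
--                 m = 0
--             if m==1:
--                 res += '1'
--                 m = 0
--             res += '5'
--     if m:
--         res += '1'+'0'*(m-1)
--     return res
-- ===== SOURCE B (Python) =====
-- def fmin(s):
--     # Run-segmentation: split s into maximal runs of equal chars, map each run
--     # to its output fragment, join the fragments.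
--     parts = []
--     i = 0
--     n = len(s)
--     while i < n:
--         j = i
--         while j < n and s[j] == s[i]:
--             j += 1
--         if s[i] == 'M':
--             parts.append('1' + '0' * (j - i - 1))
--         else:
--             parts.append('5' * (j - i))
--         i = j
--     return ''.join(parts)
-- ===== Notes on version B (the rewrite author's own statement) =====
-- stated objective: alternative
-- what changed: Replaces A's per-character state machine (pending-M counter flushed on each non-M) with explicit segmentation into maximal runs, each run mapped independently to its output fragment and the fragments joined.
import Mathlib
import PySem

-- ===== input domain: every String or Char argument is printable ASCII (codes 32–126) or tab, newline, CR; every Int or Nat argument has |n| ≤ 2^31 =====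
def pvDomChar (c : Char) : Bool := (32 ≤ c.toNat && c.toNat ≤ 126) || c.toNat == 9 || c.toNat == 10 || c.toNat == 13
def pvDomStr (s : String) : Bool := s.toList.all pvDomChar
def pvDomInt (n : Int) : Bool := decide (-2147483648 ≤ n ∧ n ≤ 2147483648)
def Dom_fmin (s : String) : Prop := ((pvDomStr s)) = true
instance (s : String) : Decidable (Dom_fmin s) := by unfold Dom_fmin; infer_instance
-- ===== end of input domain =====

-- B replaces A's per-character pending-M state machine by explicit maximal-run
-- segmentation, each run mapped independently to its fragment (alternative decomposition).

-- ===== PORT A =====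
-- A's loop over s with accumulator res and pending-M counter m (m is a count,
-- always ≥ 0 in Python, ported as Nat); '0'*(m-1) is List.replicate (m-1) '0'.
def fminAuxA : List Char → List Char → Nat → List Char
  | [], res, m => if m ≠ 0 then res ++ '1' :: List.replicate (m - 1) '0' else res
  | c :: t, res, m =>
    if c = 'M' then fminAuxA t res (m + 1)
    else
      -- "if m>1: res += '1'+'0'*(m-1); m = 0"
      let p : List Char × Nat :=
        if m > 1 then (res ++ '1' :: List.replicate (m - 1) '0', 0) else (res, m)
      -- "if m==1: res += '1'; m = 0"
      let q : List Char × Nat := if p.2 = 1 then (p.1 ++ ['1'], 0) else p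
      -- "res += '5'"
      fminAuxA t (q.1 ++ ['5']) q.2

def fmin (s : String) : String := String.ofList (fminAuxA s.toList [] 0)

-- ===== PORT B =====
-- maximal runs of equal characters: (char, run length), in order
def runs : List Char → List (Char × Nat)
  | [] => []
  | c :: t =>
    (c, 1 + (t.takeWhile (· = c)).length) :: runs (t.dropWhile (· = c))
termination_by l => l.length
decreasing_by
  simp only [List.length_cons]
  exact Nat.lt_succ_of_le (List.length_dropWhile_le _ _)

def piece : Char × Nat → List Char
  | (c, n) => if c = 'M' then '1' :: List.replicate (n - 1) '0' else List.replicate n '5'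

def fmin_alt (s : String) : String := String.ofList (((runs s.toList).map piece).flatten)

-- ===== PRECONDITION & SPEC =====
def Spec_fmin (s : String) (out : String) : Prop := out = fmin_alt s
instance (s : String) (out : String) : Decidable (Spec_fmin s out) := by unfold Spec_fmin; infer_instance

-- ===== CLAIM (what is proved, stated in full; the proofs are below) =====
def Claim_equal_fmin : Prop := ∀ (s : String), Dom_fmin s → Spec_fmin s (fmin s)

-- ===== LEMMAS AND PROOFS =====

-- B's output on a list of chars
def outB (l : List Char) : List Char := ((runs l).map piece).flatten

-- takeWhile/dropWhile of a block of 'M's followed by a non-'M' head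
theorem takeWhile_repM (m : Nat) (l : List Char) (h : l.head? ≠ some 'M') :
    (List.replicate m 'M' ++ l).takeWhile (· = 'M') = List.replicate m 'M' := by
  induction m with
  | zero =>
    cases l with
    | nil => rfl
    | cons c t =>
      have hc : c ≠ 'M' := fun e => h (by simp [e])
      simp [hc]
  | succ k ih => simp [List.replicate_succ, ih]

theorem dropWhile_repM (m : Nat) (l : List Char) (h : l.head? ≠ some 'M') :
    (List.replicate m 'M' ++ l).dropWhile (· = 'M') = l := by
  induction m with
  | zero =>
    cases l with
    | nil => rfl
    | cons c t =>
      have hc : c ≠ 'M' := fun e => h (by simp [e])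
      simp [hc]
  | succ k ih => simp [List.replicate_succ, ih]

theorem runs_repM (m : Nat) (hm : 0 < m) (l : List Char) (h : l.head? ≠ some 'M') :
    runs (List.replicate m 'M' ++ l) = ('M', m) :: runs l := by
  obtain ⟨k, rfl⟩ : ∃ k, m = k + 1 := ⟨m - 1, by omega⟩
  rw [List.replicate_succ, List.cons_append, runs,
    takeWhile_repM k l h, dropWhile_repM k l h]
  simp [Nat.add_comm]

-- non-'M' head contributes one '5' to B's output
theorem outB_cons5 (c : Char) (t : List Char) (hc : c ≠ 'M') :
    outB (c :: t) = '5' :: outB t := by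
  cases t with
  | nil => simp [outB, runs, piece, hc]
  | cons d t' =>
    by_cases hd : d = c
    · subst hd
      rw [outB, runs]
      simp only [List.takeWhile, List.dropWhile, decide_true]
      rw [outB, runs]
      simp [piece, hc, Nat.one_add, List.replicate_succ]
    · rw [outB, runs]
      have h1 : (d :: t').takeWhile (· = c) = [] := by simp [List.takeWhile, hd]
      have h2 : (d :: t').dropWhile (· = c) = d :: t' := by simp [List.dropWhile, hd]
      rw [h1, h2]
      simp [outB, piece, hc, List.replicate_succ]

def flushM (m : Nat) : List Char :=
  if m = 0 then [] else '1' :: List.replicate (m - 1) '0'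

theorem outB_rep (m : Nat) (l : List Char) (h : l.head? ≠ some 'M') :
    outB (List.replicate m 'M' ++ l) = flushM m ++ outB l := by
  cases m with
  | zero => simp [flushM]
  | succ k =>
    rw [outB, runs_repM (k + 1) (Nat.succ_pos k) l h]
    simp [flushM, piece, outB]

theorem outB_rep_nil (m : Nat) : outB (List.replicate m 'M') = flushM m := by
  have := outB_rep m [] (by simp)
  simpa [outB, runs] using this

-- main invariant: A's loop state (res, m) computes res ++ B('M'^m ++ rest)
theorem fminAuxA_eq (l : List Char) :
    ∀ (res : List Char) (m : Nat),
      fminAuxA l res m = res ++ outB (List.replicate m 'M' ++ l) := by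
  induction l with
  | nil =>
    intro res m
    rw [List.append_nil, outB_rep_nil, fminAuxA]
    cases m with
    | zero => simp [flushM]
    | succ k => simp [flushM]
  | cons c t ih =>
    intro res m
    by_cases hc : c = 'M'
    · subst hc
      rw [fminAuxA, if_pos rfl, ih]
      have : List.replicate m 'M' ++ 'M' :: t = List.replicate (m + 1) 'M' ++ t := by
        simp [List.replicate_succ']
      rw [this]
    · have hhead : (c :: t).head? ≠ some 'M' := by simp [hc]
      rw [fminAuxA, if_neg hc]
      have hout : outB (List.replicate m 'M' ++ c :: t) = flushM m ++ '5' :: outB t := by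
        rw [outB_rep m _ hhead, outB_cons5 c t hc]
      rw [hout]
      rcases m with _ | _ | k
      · simp [ih, flushM]
      · simp [ih, flushM]
      · simp only [show k + 1 + 1 > 1 by omega, if_pos]
        simp [ih, flushM]

-- ===== VERDICT (by name: the statement is the Claim_ definition above) =====
theorem fmin_spec : Claim_equal_fmin := by
  intro s _
  show fmin s = fmin_alt s
  rw [fmin, fmin_alt, fminAuxA_eq]
  simp [outB]
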